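-- pv_equiv track=rewrite | github.com/xjtu-enre/TSE2025SemArc | SemArc/utils/utils.py | get_pack_dict_level
-- ===== SOURCE A (Python) =====
-- def get_pack_dict_level(filelist_unified, level=2):
--     if [] in [f.split('/')[:-1] for f in filelist_unified]:
--         level += 1
--
--     pack_dict = {f: [] for f in filelist_unified}
--     next_filelists = [filelist_unified.copy()]
--     for l in range(level):
--         curr_filelists = next_filelists
--         next_filelists = []
--         for curr_filelist in curr_filelists:
--             splitted_files = [f.split('/')[:-1] + [None] for f in curr_filelist]
--             # rm common path
--             first_pn_set = set([lp[0] for lp in splitted_files])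
--             pack_dict_level = {f: [] for f in curr_filelist}
--             while len(first_pn_set) == 1 and None not in first_pn_set:
--                 pack_name2rm = splitted_files[0][0]
--                 splitted_files = [lp[1:] for lp in splitted_files]
--                 for f in curr_filelist:
--                     pack_dict_level[f].append(pack_name2rm)
--                 first_pn_set = set([lp[0] for lp in splitted_files])
--             for f in pack_dict_level:
--                 pack_dict[f] = pack_dict_level[f]
--             # get next level path
--             for p in first_pn_set:
--                 if p is not None:
--                     next_filelists.append([curr_filelist[i] for i, lp in enumerate(splitted_files) if lp[0] == p])
--     return {f: '/'.join(lp) for f, lp in pack_dict.items()}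
-- ===== SOURCE B (Python) =====
-- def get_pack_dict_level(filelist_unified, level=2):
--     if [] in [f.split('/')[:-1] for f in filelist_unified]:
--         level += 1
--
--     pack_dict = {f: [] for f in filelist_unified}
--
--     def recurse(files, depth):
--         parts = [f.split('/')[:-1] + [None] for f in files]
--         if parts:
--             ref = parts[0]
--             k = 0
--             while ref[k] is not None and all(p[k] == ref[k] for p in parts):
--                 k += 1
--             prefix = ref[:k]
--         else:
--             k = 0
--             prefix = []
--         for f in files:
--             pack_dict[f] = prefix
--         if depth < level - 1:
--             groups = {}
--             for f, p in zip(files, parts):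
--                 nxt = p[k]
--                 if nxt is not None:
--                     groups.setdefault(nxt, []).append(f)
--             for g in groups.values():
--                 recurse(g, depth + 1)
--
--     if level > 0:
--         recurse(list(filelist_unified), 0)
--     return {f: '/'.join(lp) for f, lp in pack_dict.items()}
-- ===== Notes on version B (the rewrite author's own statement) =====
-- stated objective: alternative
-- what changed: Replaces A's breadth-first worklist over range(level) (re-splitting and re-stripping every group's full paths each round, carrying a next_filelists queue) with a depth-first divide-and-conquer recursion that strips the common prefix by scanning a single index k, writes it once per file, partitions the group by the next component with one dict.setdefault pass, and stops descending at depth level-1.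
-- outside the precondition, e.g. on get_pack_dict_level(['a/b', 'a/b'], 2): A returns {'a/b': 'a/a'}, B returns {'a/b': 'a'}
import Mathlib
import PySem

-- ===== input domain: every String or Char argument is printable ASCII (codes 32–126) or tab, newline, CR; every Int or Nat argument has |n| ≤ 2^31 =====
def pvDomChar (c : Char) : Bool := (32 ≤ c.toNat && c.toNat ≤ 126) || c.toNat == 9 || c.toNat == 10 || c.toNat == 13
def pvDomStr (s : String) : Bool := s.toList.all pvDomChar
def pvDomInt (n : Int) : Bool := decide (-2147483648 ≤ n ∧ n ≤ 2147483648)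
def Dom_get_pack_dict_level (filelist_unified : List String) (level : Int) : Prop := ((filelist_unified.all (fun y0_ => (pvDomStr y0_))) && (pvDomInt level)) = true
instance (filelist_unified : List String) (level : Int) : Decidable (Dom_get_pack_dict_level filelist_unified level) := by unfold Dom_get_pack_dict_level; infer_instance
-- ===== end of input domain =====

-- B replaces A's breadth-first worklist over range(level) rounds by a depth-first
-- divide-and-conquer recursion (index-scan common prefix, dict-partition, recurse);
-- same return value on duplicate-free lists (objective: alternative decomposition).

-- ===== PORT A =====
-- f.split('/')[:-1]  (sep "/" is a nonempty literal, so split? is always some)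
def dirParts (f : String) : List String := ((PySem.Str.split? f "/").getD []).dropLast
-- f.split('/')[:-1] + [None]   (shared: the same expression occurs in both Pythons)
def splitParts (f : String) : List (Option String) := (dirParts f).map some ++ [none]

-- A's inner while loop: strips equal non-None heads, appending the stripped name to
-- every file's pack_dict_level entry (pdl), once per occurrence in curr.
def stripA (curr : List String) (pdl : PySem.Dict String (List String))
    (sf : List (List (Option String))) :
    PySem.Dict String (List String) × List (List (Option String)) :=
  let firsts : PySem.Set (Option String) := PySem.Set.ofList (sf.map (fun lp => lp.headD none))
  if h : firsts.length = 1 ∧ ¬ (none ∈ firsts) then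
    match hs : (sf.headD []).headD none with
    | some s =>
        stripA curr (curr.foldl (fun d f => d.modify f [] (fun ys => ys ++ [s])) pdl)
          (sf.map (fun lp => lp.drop 1))
    | none => (pdl, sf)   -- unreachable: the guard excludes a None head
  else (pdl, sf)
termination_by (sf.headD []).length
decreasing_by
  cases sf with
  | nil => exact absurd h.1 (by decide)
  | cons lp rest =>
    cases lp with
    | nil => simp at hs
    | cons a t => simp

-- the body of A's loop over curr_filelists: one group
def processGroupA (pd : PySem.Dict String (List String)) (curr : List String) :
    PySem.Dict String (List String) × List (List String) :=
  let splitted := curr.map splitParts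
  let pdl0 : PySem.Dict String (List String) :=
    curr.foldl (fun d f => d.insert f []) PySem.Dict.empty
  let res := stripA curr pdl0 splitted
  let pdl := res.1
  let rem := res.2
  let pd1 := pdl.keys.foldl (fun d f => d.insert f (pdl.getD f [])) pd
  let firsts : PySem.Set (Option String) := PySem.Set.ofList (rem.map (fun lp => lp.headD none))
  -- for p in first_pn_set: if p is not None: append the matching files (zip pairs curr with rem, as enumerate does)
  let children := firsts.foldl (fun acc p =>
      match p with
      | none => acc
      | some q => acc ++ [((curr.zip rem).filter (fun fr => fr.2.headD none == some q)).map Prod.fst]) []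
  (pd1, children)

def get_pack_dict_level (filelist_unified : List String) (level : Int) : List (String × String) :=
  let level := if [] ∈ filelist_unified.map dirParts then level + 1 else level
  let pack_dict : PySem.Dict String (List String) :=
    filelist_unified.foldl (fun d f => d.insert f []) PySem.Dict.empty
  let st := (PySem.List.pyRange 0 level 1).foldl
    (fun (st : PySem.Dict String (List String) × List (List String)) _ =>
      st.2.foldl (fun acc curr =>
          let pr := processGroupA acc.1 curr
          (pr.1, acc.2 ++ pr.2))
        (st.1, []))
    (pack_dict, [filelist_unified])
  st.1.items.map (fun fv => (fv.1, PySem.Str.join "/" fv.2))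

-- ===== PORT B =====
-- B's while loop: largest k with ref[k] non-None and all parts agreeing at k
def scanK (parts : List (List (Option String))) (ref : List (Option String)) (k : Nat) : Nat :=
  match hr : ref.getD k none with
  | none => k
  | some s => if parts.all (fun p => p.getD k none == some s) then scanK parts ref (k + 1) else k
termination_by ref.length - k
decreasing_by
  have hk : k < ref.length := by
    by_contra hk
    simp [List.getD_eq_getElem?_getD, List.getElem?_eq_none (by omega : ref.length ≤ k)] at hr
  omega

def recurseB (level : Int) (pd : PySem.Dict String (List String))
    (files : List String) (depth : Int) : PySem.Dict String (List String) :=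
  let parts := files.map splitParts
  let k : Nat := match parts with | [] => 0 | ref :: _ => scanK parts ref 0
  -- prefix = ref[:k]; its elements are all non-None, reduceOption extracts them
  let pfx : List String := match parts with | [] => [] | ref :: _ => (ref.take k).reduceOption
  let pd := files.foldl (fun d f => d.insert f pfx) pd
  if h : depth < level - 1 then
    let groups : PySem.Dict String (List String) :=
      (files.zip parts).foldl (fun g fp =>
          match fp.2.getD k none with
          | none => g
          | some p => g.insert p (g.getD p [] ++ [fp.1])) PySem.Dict.empty
    groups.items.foldl (fun pd gv => recurseB level pd gv.2 (depth + 1)) pd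
  else pd
termination_by (level - 1 - depth).toNat
decreasing_by omega

def get_pack_dict_level_alt (filelist_unified : List String) (level : Int) : List (String × String) :=
  let level := if [] ∈ filelist_unified.map dirParts then level + 1 else level
  let pd0 : PySem.Dict String (List String) :=
    filelist_unified.foldl (fun d f => d.insert f []) PySem.Dict.empty
  let pd := if 0 < level then recurseB level pd0 filelist_unified 0 else pd0
  pd.items.map (fun fv => (fv.1, PySem.Str.join "/" fv.2))

-- ===== PRECONDITION & SPEC =====
-- Pre_ excludes lists with duplicate entries when at least one stripping round runs
-- (effective level > 0): on a duplicated path A's inner loop appends each stripped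
-- component once per occurrence (['a/b','a/b'] ↦ 'a/a'), an accidental per-occurrence
-- behaviour on a list that is documented as already unified (deduplicated).
def Pre_get_pack_dict_level (filelist_unified : List String) (level : Int) : Prop :=
  filelist_unified.Nodup
    ∨ (if [] ∈ filelist_unified.map dirParts then level + 1 else level) ≤ 0

instance (filelist_unified : List String) (level : Int) : Decidable (Pre_get_pack_dict_level filelist_unified level) := by unfold Pre_get_pack_dict_level; infer_instance

def pvWitness_get_pack_dict_level : List String × Int := (["a/b/c", "a/b/d", "x"], 2)

def Spec_get_pack_dict_level (filelist_unified : List String) (level : Int) (out : List (String × String)) : Prop := out = get_pack_dict_level_alt filelist_unified level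
instance (filelist_unified : List String) (level : Int) (out : List (String × String)) : Decidable (Spec_get_pack_dict_level filelist_unified level out) := by unfold Spec_get_pack_dict_level; infer_instance

-- ===== CLAIM (what is proved, stated in full; the proofs are below) =====
def Claim_equal_get_pack_dict_level : Prop := ∀ (filelist_unified : List String) (level : Int), Dom_get_pack_dict_level filelist_unified level → Pre_get_pack_dict_level filelist_unified level → Spec_get_pack_dict_level filelist_unified level (get_pack_dict_level filelist_unified level)

-- ===== LEMMAS AND PROOFS =====

-- ── proof-side abstractions: groups, their common prefix, children, and the
--    pending-overwrites view of the two traversals ──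

def partsOf (g : List String) : List (List (Option String)) := g.map splitParts

def kOf (g : List String) : Nat :=
  match partsOf g with
  | [] => 0
  | ref :: _ => scanK (partsOf g) ref 0

def prefOf (g : List String) : List String :=
  match partsOf g with
  | [] => []
  | ref :: _ => (ref.take (kOf g)).reduceOption

def headAt (f : String) (k : Nat) : Option String := (splitParts f).getD k none

def gkeys (key : String → Option String) (l : List String) : List String :=
  (PySem.List.dedup (l.map key)).reduceOption

def gfilter (key : String → Option String) (l : List String) (p : String) : List String :=
  l.filter (fun f => key f == some p)

def childOf (g : List String) (p : String) : List String :=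
  gfilter (fun f => headAt f (kOf g)) g p

def childKeys (g : List String) : List String :=
  gkeys (fun f => headAt f (kOf g)) g

def childrenOf (g : List String) : List (List String) := (childKeys g).map (childOf g)

abbrev PDict := PySem.Dict String (List String)
abbrev WMap := String → Option (List String)

def ovw (pd : PDict) (mu : WMap) : PDict :=
  PySem.Dict.mk (pd.items.map (fun kv => (kv.1, (mu kv.1).getD kv.2)))

def mugroup (g : List String) : WMap := fun f => if f ∈ g then some (prefOf g) else none

def muspec : Nat → List String → WMap
  | 0, g => mugroup g
  | n+1, g => fun f =>
      if f ∈ g then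
        match headAt f (kOf g) with
        | none => some (prefOf g)
        | some p => muspec n (childOf g p) f
      else none

def muround (gs : List (List String)) : WMap :=
  gs.foldl (fun mu g => fun f => if f ∈ g then some (prefOf g) else mu f) (fun _ => none)

def mubfs : Nat → List (List String) → WMap
  | 0, _ => fun _ => none
  | n+1, gs => fun f => (mubfs n (gs.flatMap childrenOf) f).or (muround gs f)

def bfsP : Nat → PDict × List (List String) → PDict × List (List String)
  | 0, st => st
  | n+1, st =>
      bfsP n (st.2.foldl (fun acc curr =>
        let pr := processGroupA acc.1 curr
        (pr.1, acc.2 ++ pr.2)) (st.1, []))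

def KeysOK (pd : PDict) (g : List String) : Prop := ∀ f ∈ g, pd.contains f = true

def DisjGs (gs : List (List String)) : Prop :=
  gs.Pairwise (fun g1 g2 => ∀ f ∈ g1, f ∉ g2)

def nug (g : List String) (m : Nat) (ps : List String) : WMap := fun f =>
  if f ∈ g then
    match headAt f (kOf g) with
    | none => none
    | some p => if p ∈ ps then muspec m (childOf g p) f else none
  else none

lemma muspec_zero (g : List String) : muspec 0 g = mugroup g := rfl

lemma muspec_succ (n : Nat) (g : List String) (f : String) :
    muspec (n+1) g f = (if f ∈ g then
      (match headAt f (kOf g) with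
       | none => some (prefOf g)
       | some p => muspec n (childOf g p) f) else none) := rfl

lemma mubfs_zero (gs : List (List String)) (f : String) : mubfs 0 gs f = none := rfl

lemma mubfs_succ (n : Nat) (gs : List (List String)) (f : String) :
    mubfs (n+1) gs f = (mubfs n (gs.flatMap childrenOf) f).or (muround gs f) := rfl

-- ── generic list/option helpers ──

lemma headD_drop (l : List (Option String)) (k : Nat) :
    (l.drop k).headD none = l.getD k none := by
  simp [List.headD_eq_head?_getD, List.head?_drop, List.getD_eq_getElem?_getD]

lemma getD_some_lt {l : List (Option String)} {k : Nat} {s : String}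
    (h : l.getD k none = some s) : k < l.length := by
  by_contra hk
  simp [List.getD_eq_getElem?_getD, List.getElem?_eq_none (by omega : l.length ≤ k)] at h

lemma filter_beq_singleton {l : List String} {y : String}
    (hnd : l.Nodup) (hy : y ∈ l) : l.filter (fun x => x == y) = [y] := by
  induction l with
  | nil => cases hy
  | cons a t ih =>
      rcases List.mem_cons.1 hy with h | h
      · subst h
        have ht : t.filter (fun x => x == y) = [] := by
          apply List.filter_eq_nil_iff.2
          intro x hx
          simp only [beq_iff_eq]
          intro hxa; exact (List.nodup_cons.1 hnd).1 (hxa ▸ hx)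
        simp [ht]
      · have hne : (a == y) = false := by
          simp only [beq_eq_false_iff_ne]
          intro hay; exact (List.nodup_cons.1 hnd).1 (hay ▸ h)
        simp [hne, ih (List.nodup_cons.1 hnd).2 h]

lemma zip_foldl {α β γ : Type} (h : α → β) (B : γ → α × β → γ) :
    ∀ (l : List α) (d : γ), (l.zip (l.map h)).foldl B d = l.foldl (fun d f => B d (f, h f)) d := by
  intro l
  induction l with
  | nil => intro d; rfl
  | cons a t ih => intro d; simp only [List.map_cons, List.zip_cons_cons, List.foldl_cons, ih]

lemma zip_filter_map {α β : Type} (h : α → β) (P : β → Bool) :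
    ∀ l : List α, ((l.zip (l.map h)).filter (fun fr => P fr.2)).map Prod.fst
      = l.filter (fun f => P (h f)) := by
  intro l
  induction l with
  | nil => rfl
  | cons a t ih =>
      simp only [List.map_cons, List.zip_cons_cons, List.filter_cons]
      cases hp : P (h a) <;> simp [ih]

lemma foldl_opt_append {β : Type} (F : String → β) :
    ∀ (s : List (Option String)) (acc : List β),
      s.foldl (fun acc p => match p with | none => acc | some q => acc ++ [F q]) acc
        = acc ++ s.reduceOption.map F := by
  intro s
  induction s with
  | nil => intro acc; simp
  | cons a t ih =>
      intro acc
      cases a with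
      | none => simp [ih]
      | some q => simp [ih]

-- ── PySem.Set facts about singleton head-sets and dedup/reduceOption ──

lemma set_singleton_of_all {α : Type} [BEq α] [LawfulBEq α] (x : α) (l : List α)
    (h : ∀ y ∈ l, y = x) : PySem.Set.ofList (x :: l) = [x] := by
  have hx : x ∈ PySem.Set.ofList (x :: l) := (PySem.Set.mem_ofList _ _).2 (by simp)
  have hnd := PySem.Set.nodup_ofList (x :: l)
  have hall : ∀ y ∈ PySem.Set.ofList (x :: l), y = x := by
    intro y hy
    rcases List.mem_cons.1 ((PySem.Set.mem_ofList _ _).1 hy) with h1 | h1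
    · exact h1
    · exact h y h1
  cases hs : PySem.Set.ofList (x :: l) with
  | nil => rw [hs] at hx; cases hx
  | cons a t =>
      have ha : a = x := hall a (by rw [hs]; simp)
      cases t with
      | nil => rw [ha]
      | cons b t2 =>
          have hb : b = x := hall b (by rw [hs]; simp)
          rw [hs] at hnd
          exact absurd (ha.trans hb.symm) (by simp at hnd; exact hnd.1.1)

lemma all_eq_of_len_one {α : Type} [BEq α] [LawfulBEq α] (l : List α)
    (h : (PySem.Set.ofList l).length = 1) : ∀ a ∈ l, ∀ b ∈ l, a = b := by
  rcases List.length_eq_one_iff.1 h with ⟨u, hu⟩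
  intro a ha b hb
  have h1 : a = u := by
    have := (PySem.Set.mem_ofList l a).2 ha
    rw [hu] at this; simpa using this
  have h2 : b = u := by
    have := (PySem.Set.mem_ofList l b).2 hb
    rw [hu] at this; simpa using this
  rw [h1, h2]

lemma ofList_append_singleton {α : Type} [BEq α] (l : List α) (x : α) :
    PySem.Set.ofList (l ++ [x]) = PySem.Set.add (PySem.Set.ofList l) x := by
  rw [PySem.Set.ofList_eq_foldl, PySem.Set.ofList_eq_foldl, List.foldl_append]
  rfl

lemma update_eq_of_subset {α : Type} [BEq α] [LawfulBEq α] :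
    ∀ (l : List α) (s : PySem.Set α), (∀ x ∈ l, x ∈ s) → PySem.Set.update s l = s := by
  intro l
  induction l with
  | nil => intro s _; rfl
  | cons a t ih =>
      intro s h
      have : PySem.Set.update s (a :: t) = PySem.Set.update (s.add a) t := rfl
      rw [this, PySem.Set.add_of_mem (h a (by simp))]
      exact ih s (fun x hx => h x (by simp [hx]))

-- ── gkeys / gfilter (grouping) facts ──

lemma mem_gkeys (key : String → Option String) (l : List String) (p : String) :
    p ∈ gkeys key l ↔ some p ∈ l.map key := by
  unfold gkeys
  rw [PySem.List.dedup_eq_ofList]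
  rw [List.reduceOption_mem_iff]
  exact PySem.Set.mem_ofList _ _

lemma nodup_gkeys (key : String → Option String) (l : List String) :
    (gkeys key l).Nodup := by
  unfold gkeys
  rw [PySem.List.dedup_eq_ofList]
  have := PySem.Set.nodup_ofList (l.map key)
  unfold List.reduceOption
  exact this.filterMap (by intro a a' b hb hb'; cases a <;> cases a' <;> simp_all)

lemma gkeys_eq_set (key : String → Option String) (l : List String) :
    gkeys key l = (PySem.Set.ofList (l.map key)).reduceOption := by
  unfold gkeys; rw [PySem.List.dedup_eq_ofList]

lemma gkeys_append_none (key : String → Option String) (l : List String) (f : String)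
    (h : key f = none) : gkeys key (l ++ [f]) = gkeys key l := by
  rw [gkeys_eq_set, gkeys_eq_set, List.map_append, List.map_singleton, h,
    ofList_append_singleton]
  by_cases hc : (none : Option String) ∈ PySem.Set.ofList (l.map key)
  · rw [PySem.Set.add_of_mem hc]
  · rw [PySem.Set.add_of_not_mem hc, List.reduceOption_append]
    simp

lemma gkeys_append_some_mem (key : String → Option String) (l : List String) (f p : String)
    (h : key f = some p) (hp : p ∈ gkeys key l) : gkeys key (l ++ [f]) = gkeys key l := by
  rw [gkeys_eq_set, gkeys_eq_set, List.map_append, List.map_singleton, h,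
    ofList_append_singleton, PySem.Set.add_of_mem]
  rw [gkeys_eq_set] at hp
  rw [PySem.Set.mem_ofList]
  have := List.reduceOption_mem_iff.1 hp
  exact (PySem.Set.mem_ofList _ _).1 this

lemma gkeys_append_some_new (key : String → Option String) (l : List String) (f p : String)
    (h : key f = some p) (hp : p ∉ gkeys key l) : gkeys key (l ++ [f]) = gkeys key l ++ [p] := by
  rw [gkeys_eq_set, gkeys_eq_set, List.map_append, List.map_singleton, h,
    ofList_append_singleton, PySem.Set.add_of_not_mem (by
      rw [PySem.Set.mem_ofList]
      intro hmem
      apply hp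
      rw [gkeys_eq_set]
      exact List.reduceOption_mem_iff.2 ((PySem.Set.mem_ofList _ _).2 hmem)),
    List.reduceOption_append]
  rfl

lemma gfilter_eq_nil (key : String → Option String) (l : List String) (p : String)
    (hp : p ∉ gkeys key l) : gfilter key l p = [] := by
  apply List.filter_eq_nil_iff.2
  intro f hf
  simp only [beq_iff_eq]
  intro hkey
  exact hp ((mem_gkeys key l p).2 (by rw [← hkey]; exact List.mem_map_of_mem hf))

-- ── ovw: the pointwise-overwrite view of a Dict whose keys all pre-exist ──

lemma items_ovw (pd : PDict) (mu : WMap) :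
    (ovw pd mu).items = pd.items.map (fun kv => (kv.1, (mu kv.1).getD kv.2)) := rfl

lemma ovw_none (pd : PDict) (mu : WMap) (h : ∀ f, mu f = none) : ovw pd mu = pd := by
  apply PySem.Dict.ext
  simp [items_ovw, h]

lemma keys_ovw (pd : PDict) (mu : WMap) : (ovw pd mu).keys = pd.keys := by
  simp only [PySem.Dict.keys, items_ovw, List.map_map]
  rfl

lemma contains_ovw (pd : PDict) (mu : WMap) (f : String) :
    (ovw pd mu).contains f = pd.contains f := by
  rw [PySem.Dict.contains_eq_decide_mem_keys, PySem.Dict.contains_eq_decide_mem_keys, keys_ovw]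

lemma ovw_ovw (pd : PDict) (mu nu : WMap) :
    ovw (ovw pd mu) nu = ovw pd (fun f => (nu f).or (mu f)) := by
  apply PySem.Dict.ext
  simp only [items_ovw, List.map_map]
  apply List.map_congr_left
  intro kv _
  cases hn : nu kv.1 <;> simp [hn, Option.or]

lemma insert_eq_ovw (pd : PDict) (f : String) (v : List String) (h : pd.contains f = true) :
    pd.insert f v = ovw pd (fun x => if x = f then some v else none) := by
  apply PySem.Dict.ext
  rw [PySem.Dict.items_insert_of_contains pd v h, items_ovw]
  apply List.map_congr_left
  intro kv _
  by_cases hk : kv.1 = f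
  · simp [hk]
  · simp [hk]

lemma writes_eq_ovw (v : List String) :
    ∀ (l : List String) (pd : PDict), KeysOK pd l →
      l.foldl (fun d f => d.insert f v) pd = ovw pd (fun x => if x ∈ l then some v else none) := by
  intro l
  induction l using List.reverseRecOn with
  | nil =>
      intro pd _
      simp only [List.foldl_nil]
      rw [ovw_none]
      intro f; simp
  | append_singleton l f ih =>
      intro pd h
      rw [List.foldl_append]
      simp only [List.foldl_cons, List.foldl_nil]
      rw [ih pd (fun x hx => h x (by simp [hx])),
          insert_eq_ovw _ _ _ (by rw [contains_ovw]; exact h f (by simp)), ovw_ovw]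
      congr 1
      funext x
      by_cases h1 : x = f
      · simp [h1]
      · by_cases h2 : x ∈ l <;> simp [h1, h2, Option.or]

-- ── the initial dict {f: [] for f in l} ──

lemma init_items (l : List String) (hnd : l.Nodup) :
    (l.foldl (fun d f => d.insert f ([] : List String)) PySem.Dict.empty).items
      = l.map (fun f => (f, ([] : List String))) := by
  have h := PySem.Dict.items_foldl_insert_fresh (ν := List String) l (fun f => f) (fun _ => [])
    PySem.Dict.empty (by intro a _; exact PySem.Dict.contains_empty a) (by simpa using hnd)
  simpa using h

lemma init_keys (l : List String) (hnd : l.Nodup) :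
    (l.foldl (fun d f => d.insert f ([] : List String)) PySem.Dict.empty).keys = l := by
  simp only [PySem.Dict.keys, init_items l hnd, List.map_map]
  show List.map (fun f => ((f, ([] : List String))).1) l = l
  simp

lemma init_contains (l : List String) (hnd : l.Nodup) (f : String) (hf : f ∈ l) :
    (l.foldl (fun d f => d.insert f ([] : List String)) PySem.Dict.empty).contains f = true := by
  rw [PySem.Dict.contains_eq_decide_mem_keys, init_keys l hnd]
  simpa using hf

lemma init_getD (l : List String) (hnd : l.Nodup) (f : String) (hf : f ∈ l) :
    (l.foldl (fun d f => d.insert f ([] : List String)) PySem.Dict.empty).getD f [] = [] := by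
  apply PySem.Dict.getD_of_mem_items
  · rw [init_items l hnd]
    exact List.mem_map_of_mem hf
  · rw [init_keys l hnd]; exact hnd

-- ── scanK facts ──

lemma scanK_ge (parts : List (List (Option String))) (ref : List (Option String)) :
    ∀ k, k ≤ scanK parts ref k := by
  intro k
  fun_induction scanK parts ref k with
  | case1 => omega
  | case2 => omega
  | case3 => omega

lemma scanK_stop (parts : List (List (Option String))) (ref : List (Option String)) (k : Nat)
    (h : ref.getD k none = none) : scanK parts ref k = k := by
  rw [scanK.eq_def]
  split
  · rfl
  · next s' hr => rw [h] at hr; cases hr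

lemma scanK_step (parts : List (List (Option String))) (ref : List (Option String)) (k : Nat)
    (s : String) (h1 : ref.getD k none = some s)
    (h2 : parts.all (fun p => p.getD k none == some s) = true) :
    scanK parts ref k = scanK parts ref (k + 1) := by
  rw [scanK.eq_def]
  split
  · next hr => rw [h1] at hr; cases hr
  · next s' hr =>
      rw [h1] at hr
      cases hr
      rw [if_pos h2]

lemma scanK_halt (parts : List (List (Option String))) (ref : List (Option String)) (k : Nat)
    (s : String) (h1 : ref.getD k none = some s)
    (h2 : parts.all (fun p => p.getD k none == some s) = false) :
    scanK parts ref k = k := by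
  rw [scanK.eq_def]
  split
  · rfl
  · next s' hr =>
      rw [h1] at hr
      cases hr
      rw [if_neg (by rw [h2]; exact Bool.false_ne_true)]

lemma stripA_stop (curr : List String) (pdl : PDict) (sf : List (List (Option String)))
    (hcond : ¬ ((PySem.Set.ofList (sf.map (fun lp => lp.headD none))).length = 1
      ∧ ¬ ((none : Option String) ∈ PySem.Set.ofList (sf.map (fun lp => lp.headD none))))) :
    stripA curr pdl sf = (pdl, sf) := by
  rw [stripA.eq_def]
  dsimp only []
  rw [dif_neg hcond]

lemma stripA_step (curr : List String) (pdl : PDict) (sf : List (List (Option String)))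
    (s : String)
    (hcond : (PySem.Set.ofList (sf.map (fun lp => lp.headD none))).length = 1
      ∧ ¬ ((none : Option String) ∈ PySem.Set.ofList (sf.map (fun lp => lp.headD none))))
    (hs : (sf.headD []).headD none = some s) :
    stripA curr pdl sf
      = stripA curr (curr.foldl (fun d f => d.modify f [] (fun ys => ys ++ [s])) pdl)
          (sf.map (fun lp => lp.drop 1)) := by
  rw [stripA.eq_def]
  dsimp only []
  rw [dif_pos hcond]
  split
  · next s' hs' =>
      rw [hs] at hs'
      cases hs'
      rfl
  · next hs' => rw [hs] at hs'; cases hs'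

-- ── stripA: A's while loop computes scanK's prefix, once per key on a Nodup group ──

lemma stripA_spec (curr : List String) (hnd : curr.Nodup)
    (ref : List (Option String)) (rest : List (List (Option String)))
    (h0 : partsOf curr = ref :: rest) :
    ∀ (m k : Nat) (pdl : PDict), ref.length - k ≤ m → pdl.keys = curr →
      (stripA curr pdl ((partsOf curr).map (fun lp => lp.drop k))).2
          = (partsOf curr).map (fun lp => lp.drop (scanK (partsOf curr) ref k))
      ∧ (stripA curr pdl ((partsOf curr).map (fun lp => lp.drop k))).1.keys = curr
      ∧ ∀ f ∈ curr, ∀ (acc : List String),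
          pdl.getD f [] = acc →
          (stripA curr pdl ((partsOf curr).map (fun lp => lp.drop k))).1.getD f []
            = acc ++ ((ref.drop k).take (scanK (partsOf curr) ref k - k)).reduceOption := by
  have hmem_ref : ref ∈ partsOf curr := by rw [h0]; exact List.mem_cons_self
  intro m
  induction m with
  | zero =>
      intro k pdl hm hkeys
      have hr : ref.getD k none = none := by
        rw [List.getD_eq_getElem?_getD, List.getElem?_eq_none (by omega)]
        rfl
      have hnonemem : (none : Option String)
          ∈ PySem.Set.ofList (((partsOf curr).map (fun lp => lp.drop k)).map
              (fun lp => lp.headD none)) := by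
        rw [PySem.Set.mem_ofList, List.map_map]
        refine List.mem_map.2 ⟨ref, hmem_ref, ?_⟩
        show (ref.drop k).headD none = none
        rw [headD_drop, hr]
      rw [stripA_stop curr pdl _ (fun hc => hc.2 hnonemem),
        scanK_stop (partsOf curr) ref k hr]
      refine ⟨rfl, hkeys, ?_⟩
      intro f hf acc hacc
      simp [hacc]
  | succ m ih =>
      intro k pdl hm hkeys
      cases hr : ref.getD k none with
      | none =>
          have hnonemem : (none : Option String)
              ∈ PySem.Set.ofList (((partsOf curr).map (fun lp => lp.drop k)).map
                  (fun lp => lp.headD none)) := by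
            rw [PySem.Set.mem_ofList, List.map_map]
            refine List.mem_map.2 ⟨ref, hmem_ref, ?_⟩
            show (ref.drop k).headD none = none
            rw [headD_drop, hr]
          rw [stripA_stop curr pdl _ (fun hc => hc.2 hnonemem),
            scanK_stop (partsOf curr) ref k hr]
          refine ⟨rfl, hkeys, ?_⟩
          intro f hf acc hacc
          simp [hacc]
      | some s =>
          have hk : k < ref.length := getD_some_lt hr
          cases hall : (partsOf curr).all (fun p => p.getD k none == some s) with
          | false =>
              rcases List.all_eq_false.1 hall with ⟨p, hp, hps⟩
              have hcond : ¬ ((PySem.Set.ofList (((partsOf curr).map (fun lp => lp.drop k)).map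
                    (fun lp => lp.headD none))).length = 1
                  ∧ ¬ ((none : Option String) ∈ PySem.Set.ofList
                      (((partsOf curr).map (fun lp => lp.drop k)).map (fun lp => lp.headD none)))) := by
                rintro ⟨h1, -⟩
                have hmem1 : (ref.drop k).headD none
                    ∈ ((partsOf curr).map (fun lp => lp.drop k)).map (fun lp => lp.headD none) := by
                  rw [List.map_map]
                  exact List.mem_map.2 ⟨ref, hmem_ref, rfl⟩
                have hmem2 : (p.drop k).headD none
                    ∈ ((partsOf curr).map (fun lp => lp.drop k)).map (fun lp => lp.headD none) := by
                  rw [List.map_map]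
                  exact List.mem_map.2 ⟨p, hp, rfl⟩
                have heq := all_eq_of_len_one _ h1 _ hmem1 _ hmem2
                rw [headD_drop, headD_drop, hr] at heq
                simp at hps
                exact hps heq.symm
              rw [stripA_stop curr pdl _ hcond,
                scanK_halt (partsOf curr) ref k s hr hall]
              refine ⟨rfl, hkeys, ?_⟩
              intro f hf acc hacc
              simp [hacc]
          | true =>
              have hallmem : ∀ p ∈ partsOf curr, p.getD k none = some s := by
                intro p hp
                have := List.all_eq_true.1 hall p hp
                simpa using this
              have hheads : ((partsOf curr).map (fun lp => lp.drop k)).map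
                  (fun lp => lp.headD none)
                  = (some s) :: (rest.map (fun lp => lp.getD k none)) := by
                rw [List.map_map, h0]
                simp only [List.map_cons]
                congr 1
                · show (ref.drop k).headD none = some s
                  rw [headD_drop, hr]
                · apply List.map_congr_left
                  intro lp _
                  exact headD_drop lp k
              have hcond : (PySem.Set.ofList (((partsOf curr).map (fun lp => lp.drop k)).map
                    (fun lp => lp.headD none))).length = 1
                  ∧ ¬ ((none : Option String) ∈ PySem.Set.ofList
                      (((partsOf curr).map (fun lp => lp.drop k)).map (fun lp => lp.headD none))) := by
                rw [hheads, set_singleton_of_all (some s) _ ?_]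
                · constructor
                  · rfl
                  · simp
                · intro y hy
                  rcases List.mem_map.1 hy with ⟨lp, hlp, hval⟩
                  rw [← hval]
                  exact hallmem lp (by rw [h0]; exact List.mem_cons_of_mem _ hlp)
              have hs1 : ((((partsOf curr).map (fun lp => lp.drop k)).headD []).headD none)
                  = some s := by
                rw [h0, List.map_cons, List.headD_cons, headD_drop, hr]
              rw [stripA_step curr pdl _ s hcond hs1]
              have hdrops : (((partsOf curr).map (fun lp => lp.drop k)).map
                  (fun lp => lp.drop 1)) = (partsOf curr).map (fun lp => lp.drop (k + 1)) := by
                rw [List.map_map]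
                apply List.map_congr_left
                intro lp _
                show (lp.drop k).drop 1 = lp.drop (k + 1)
                rw [List.drop_drop]
              rw [hdrops]
              set pdl2 := curr.foldl (fun d f => d.modify f [] (fun ys => ys ++ [s])) pdl with hpdl2
              have hkeys2 : pdl2.keys = curr := by
                rw [hpdl2]
                rw [show (fun (d : PDict) (f : String) => d.modify f [] (fun ys => ys ++ [s]))
                  = (fun (d : PDict) (x : String) =>
                      d.modify x [] ((fun (_ : PDict) (_ : String) => (fun ys => ys ++ [s])) d x)) from rfl]
                rw [PySem.Dict.keys_foldl_modify]
                rw [update_eq_of_subset curr pdl.keys (by rw [hkeys]; exact fun x hx => hx), hkeys]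
              have H := ih (k + 1) pdl2 (by omega) hkeys2
              have hKstep := scanK_step (partsOf curr) ref k s hr hall
              have hgetD2 : ∀ f ∈ curr, ∀ acc, pdl.getD f [] = acc → pdl2.getD f [] = acc ++ [s] := by
                intro f hf acc hacc
                rw [hpdl2, show curr.foldl (fun d f => d.modify f [] (fun ys => ys ++ [s])) pdl
                    = (curr.map (fun f => (f, s))).foldl
                        (fun d p => d.modify p.1 [] (fun x => x ++ [p.2])) pdl from by
                  rw [List.foldl_map]]
                rw [PySem.Dict.getD_foldl_modify_append, hacc]
                congr 1
                rw [List.filter_map]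
                have : (curr.filter ((fun p => p.1 == f) ∘ (fun f => (f, s)))) = [f] := by
                  have h2 := filter_beq_singleton hnd hf
                  simpa using h2
                rw [this]
                rfl
              refine ⟨?_, ?_, ?_⟩
              · rw [H.1, hKstep]
              · exact H.2.1
              · intro f hf acc hacc
                rw [H.2.2 f hf (acc ++ [s]) (hgetD2 f hf acc hacc), hKstep]
                have hrefk : ref.drop k = some s :: ref.drop (k + 1) := by
                  rw [List.drop_eq_getElem_cons hk]
                  congr 1
                  rw [List.getD_eq_getElem?_getD, List.getElem?_eq_getElem hk] at hr
                  simpa using hr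
                have hge : k + 1 ≤ scanK (partsOf curr) ref (k + 1) := scanK_ge _ _ _
                have hsub : scanK (partsOf curr) ref (k + 1) - k
                    = (scanK (partsOf curr) ref (k + 1) - (k + 1)) + 1 := by omega
                rw [hrefk, hsub, List.take_succ_cons]
                simp

-- ── processGroupA: one round-body call, as overwrite + children ──

lemma processGroupA_eq (pd : PDict) (curr : List String) (hnd : curr.Nodup)
    (hkeys : KeysOK pd curr) :
    processGroupA pd curr = (ovw pd (mugroup curr), childrenOf curr) := by
  cases curr with
  | nil =>
      rw [processGroupA]
      simp only [List.map_nil, List.foldl_nil]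
      rw [stripA_stop [] PySem.Dict.empty [] (by intro hc; simp at hc)]
      rw [ovw_none pd _ (fun f => by simp [mugroup])]
      rfl
  | cons c ctl =>
      rw [processGroupA]
      rw [show (c :: ctl).map splitParts
          = (partsOf (c :: ctl)).map (fun lp => lp.drop 0) from by
        simp [partsOf]]
      have h0 : partsOf (c :: ctl) = splitParts c :: ctl.map splitParts := rfl
      have hnd' : (c :: ctl).Nodup := hnd
      have keys0 := init_keys (c :: ctl) hnd'
      have H := stripA_spec (c :: ctl) hnd' (splitParts c) (ctl.map splitParts) h0
        (splitParts c).length 0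
        ((c :: ctl).foldl (fun d f => d.insert f ([] : List String)) PySem.Dict.empty)
        (by omega) keys0
      have hKof : kOf (c :: ctl) = scanK (partsOf (c :: ctl)) (splitParts c) 0 := rfl
      have hvals : ∀ f ∈ (c :: ctl),
          (stripA (c :: ctl)
            ((c :: ctl).foldl (fun d f => d.insert f ([] : List String)) PySem.Dict.empty)
            ((partsOf (c :: ctl)).map (fun lp => lp.drop 0))).1.getD f []
          = prefOf (c :: ctl) := by
        intro f hf
        rw [H.2.2 f hf [] (init_getD (c :: ctl) hnd' f hf)]
        show [] ++ (((splitParts c).drop 0).take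
            (scanK (partsOf (c :: ctl)) (splitParts c) 0 - 0)).reduceOption = _
        rw [List.nil_append, List.drop_zero, Nat.sub_zero, ← hKof]
        rfl
      refine Prod.ext_iff.2 ⟨?_, ?_⟩
      · -- the pack_dict copy loop
        rw [H.2.1]
        rw [PySem.List.foldl_congr_mem (c :: ctl) _
          (fun d f => d.insert f (prefOf (c :: ctl))) pd
          (by intro acc f hf; rw [hvals f hf])]
        exact writes_eq_ovw (prefOf (c :: ctl)) (c :: ctl) pd hkeys
      · -- the children lists
        rw [H.1, ← hKof]
        have hheads : ((partsOf (c :: ctl)).map (fun lp => lp.drop (kOf (c :: ctl)))).map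
            (fun lp => lp.headD none)
            = (c :: ctl).map (fun f => headAt f (kOf (c :: ctl))) := by
          show (((c :: ctl).map splitParts).map _).map _ = _
          rw [List.map_map, List.map_map]
          apply List.map_congr_left
          intro f _
          show ((splitParts f).drop (kOf (c :: ctl))).headD none = _
          rw [headD_drop]
          rfl
        rw [hheads]
        rw [show (partsOf (c :: ctl)).map (fun lp => lp.drop (kOf (c :: ctl)))
            = (c :: ctl).map (fun f => (splitParts f).drop (kOf (c :: ctl))) from by
          show ((c :: ctl).map splitParts).map _ = _
          rw [List.map_map]
          rfl]
        rw [foldl_opt_append, List.nil_append]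
        have hck : childKeys (c :: ctl) = (PySem.Set.ofList
            ((c :: ctl).map (fun f => headAt f (kOf (c :: ctl))))).reduceOption := by
          rw [childKeys, gkeys_eq_set]
        rw [← hck]
        unfold childrenOf
        apply List.map_congr_left
        intro q hq
        rw [zip_filter_map (fun f => (splitParts f).drop (kOf (c :: ctl)))
          (fun lp => lp.headD none == some q) (c :: ctl)]
        have hfeq : (fun f => ((splitParts f).drop (kOf (c :: ctl))).headD none == some q)
            = (fun f => headAt f (kOf (c :: ctl)) == some q) := by
          funext f
          rw [headD_drop]
          rfl
        rw [hfeq]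
        rfl

-- ── B's grouping dict ──

lemma gdict_items (key : String → Option String) :
    ∀ l : List String,
      (l.foldl (fun g f => match key f with
         | none => g
         | some p => g.insert p (g.getD p [] ++ [f])) (PySem.Dict.empty : PDict)).items
      = (gkeys key l).map (fun p => (p, gfilter key l p)) := by
  intro l
  induction l using List.reverseRecOn with
  | nil => rfl
  | append_singleton l f ih =>
      rw [List.foldl_append, List.foldl_cons, List.foldl_nil]
      have hkeys : (l.foldl (fun g f => match key f with
          | none => g
          | some p => g.insert p (g.getD p [] ++ [f])) (PySem.Dict.empty : PDict)).keys
          = gkeys key l := by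
        show ((l.foldl _ _ : PDict)).items.map Prod.fst = _
        rw [ih, List.map_map]
        show List.map (fun p => ((p, gfilter key l p)).1) (gkeys key l) = _
        simp
      have hnodup : (l.foldl (fun g f => match key f with
          | none => g
          | some p => g.insert p (g.getD p [] ++ [f])) (PySem.Dict.empty : PDict)).keys.Nodup := by
        rw [hkeys]; exact nodup_gkeys key l
      cases hkf : key f with
      | none =>
          dsimp only []
          rw [ih, gkeys_append_none key l f hkf]
          apply List.map_congr_left
          intro p hp
          unfold gfilter
          rw [List.filter_append]
          have : List.filter (fun f => key f == some p) [f] = [] := by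
            simp [hkf]
          rw [this, List.append_nil]
      | some p =>
          dsimp only []
          by_cases hp : p ∈ gkeys key l
          · have hcont : (l.foldl (fun g f => match key f with
                | none => g
                | some p => g.insert p (g.getD p [] ++ [f])) (PySem.Dict.empty : PDict)).contains p
                = true := by
              rw [PySem.Dict.contains_eq_decide_mem_keys, hkeys]; simpa using hp
            have hgetD : (l.foldl (fun g f => match key f with
                | none => g
                | some p => g.insert p (g.getD p [] ++ [f])) (PySem.Dict.empty : PDict)).getD p []
                = gfilter key l p := by
              apply PySem.Dict.getD_of_mem_items
              · rw [ih]; exact List.mem_map_of_mem hp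
              · exact hnodup
            rw [hgetD, PySem.Dict.items_insert_of_contains _ _ hcont, ih, List.map_map,
              gkeys_append_some_mem key l f p hkf hp]
            apply List.map_congr_left
            intro x hx
            by_cases hxp : x = p
            · subst hxp
              simp only [Function.comp]
              rw [if_pos (by simp)]
              unfold gfilter
              rw [List.filter_append]
              have : List.filter (fun f => key f == some x) [f] = [f] := by simp [hkf]
              rw [this]
            · simp only [Function.comp]
              rw [if_neg (by simpa using hxp)]
              unfold gfilter
              rw [List.filter_append]
              have : List.filter (fun f' => key f' == some x) [f] = [] := by
                simp [hkf]; exact fun he => hxp he.symm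
              rw [this, List.append_nil]
          · have hcont : (l.foldl (fun g f => match key f with
                | none => g
                | some p => g.insert p (g.getD p [] ++ [f])) (PySem.Dict.empty : PDict)).contains p
                = false := by
              rw [PySem.Dict.contains_eq_decide_mem_keys, hkeys]; simpa using hp
            rw [PySem.Dict.getD_of_not_contains _ _ hcont,
              PySem.Dict.items_insert_of_not_contains _ _ hcont, ih,
              gkeys_append_some_new key l f p hkf hp, List.map_append]
            congr 1
            · apply List.map_congr_left
              intro x hx
              have hxp : x ≠ p := fun he => hp (he ▸ hx)
              unfold gfilter
              rw [List.filter_append]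
              have : List.filter (fun f' => key f' == some x) [f] = [] := by
                simp [hkf]; exact fun he => hxp he.symm
              rw [this, List.append_nil]
            · simp only [List.map_singleton, List.nil_append]
              unfold gfilter
              rw [List.filter_append]
              have h1 := gfilter_eq_nil key l p hp
              unfold gfilter at h1
              rw [h1]
              have h2 : List.filter (fun f' => key f' == some p) [f] = [f] := by simp [hkf]
              rw [h2]
              rfl

-- ── membership / structure of children ──

lemma mem_child_iff (g : List String) (p f : String) :
    f ∈ childOf g p ↔ f ∈ g ∧ headAt f (kOf g) = some p := by
  unfold childOf gfilter
  rw [List.mem_filter]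
  simp

lemma child_subset (g : List String) (p : String) : ∀ f ∈ childOf g p, f ∈ g := by
  intro f hf; exact ((mem_child_iff g p f).1 hf).1

lemma child_nodup (g : List String) (hnd : g.Nodup) (p : String) : (childOf g p).Nodup :=
  hnd.filter _

lemma mem_childKeys (g : List String) (f p : String) (hf : f ∈ g)
    (hh : headAt f (kOf g) = some p) : p ∈ childKeys g := by
  unfold childKeys
  rw [mem_gkeys]
  exact (by rw [← hh]; exact List.mem_map_of_mem hf)

lemma nodup_childKeys (g : List String) : (childKeys g).Nodup := nodup_gkeys _ _

lemma disj_children (g : List String) : DisjGs (childrenOf g) := by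
  unfold childrenOf DisjGs
  apply List.Pairwise.map (R := fun p q => p ≠ q)
  · intro p q hpq f hfp hfq
    have h1 := (mem_child_iff g p f).1 hfp
    have h2 := (mem_child_iff g q f).1 hfq
    exact hpq (by rw [h1.2] at h2; exact Option.some_inj.1 h2.2)
  · exact nodup_childKeys g

lemma mem_childrenOf_subset (g : List String) (c : List String) (hc : c ∈ childrenOf g) :
    ∀ f ∈ c, f ∈ g := by
  rcases List.mem_map.1 hc with ⟨p, _, hp⟩
  intro f hf; exact child_subset g p f (hp ▸ hf)

lemma mem_childrenOf_nodup (g : List String) (hnd : g.Nodup) (c : List String)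
    (hc : c ∈ childrenOf g) : c.Nodup := by
  rcases List.mem_map.1 hc with ⟨p, _, hp⟩
  exact hp ▸ child_nodup g hnd p

lemma disj_flatMap (gs : List (List String)) (h : DisjGs gs) :
    DisjGs (gs.flatMap childrenOf) := by
  induction gs with
  | nil => exact List.Pairwise.nil
  | cons g tl ih =>
      rw [List.flatMap_cons]
      rw [DisjGs, List.pairwise_append]
      refine ⟨disj_children g, ih (List.pairwise_cons.1 h).2, ?_⟩
      intro c1 hc1 c2 hc2 f hf1 hf2
      rcases List.mem_flatMap.1 hc2 with ⟨g', hg', hcg'⟩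
      exact (List.pairwise_cons.1 h).1 g' hg' f (mem_childrenOf_subset g c1 hc1 f hf1)
        (mem_childrenOf_subset g' c2 hcg' f hf2)

-- ── mu-function facts ──

lemma muspec_none (n : Nat) (g : List String) (f : String) (hf : f ∉ g) :
    muspec n g f = none := by
  cases n with
  | zero => rw [muspec_zero]; simp [mugroup, hf]
  | succ n => rw [muspec_succ]; simp [hf]

lemma muspec_isSome (n : Nat) (g : List String) (f : String) (hf : f ∈ g) :
    ∃ v, muspec n g f = some v := by
  induction n generalizing g with
  | zero => exact ⟨prefOf g, by rw [muspec_zero]; simp [mugroup, hf]⟩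
  | succ n ih =>
      cases hh : headAt f (kOf g) with
      | none => exact ⟨prefOf g, by rw [muspec_succ]; simp [hf, hh]⟩
      | some p =>
          rcases ih (childOf g p) ((mem_child_iff g p f).2 ⟨hf, hh⟩) with ⟨v, hv⟩
          exact ⟨v, by rw [muspec_succ]; simp [hf, hh, hv]⟩

lemma muround_base (tl : List (List String)) :
    ∀ (base : WMap) (f : String),
      tl.foldl (fun mu g => fun f => if f ∈ g then some (prefOf g) else mu f) base f
        = (muround tl f).or (base f) := by
  induction tl with
  | nil => intro base f; rw [muround]; simp
  | cons g tl ih =>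
      intro base f
      rw [List.foldl_cons]
      have h1 := ih (fun f => if f ∈ g then some (prefOf g) else base f) f
      have h2 := ih (fun f => if f ∈ g then some (prefOf g) else none) f
      rw [h1]
      conv_rhs => rw [muround, List.foldl_cons]
      rw [h2]
      cases muround tl f <;> by_cases hf : f ∈ g <;> simp [hf, Option.or]

lemma muround_cons (g : List String) (tl : List (List String)) (f : String) :
    muround (g :: tl) f = (muround tl f).or (if f ∈ g then some (prefOf g) else none) := by
  rw [muround, List.foldl_cons, muround_base]

lemma muround_none (gs : List (List String)) (f : String) (h : ∀ g ∈ gs, f ∉ g) :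
    muround gs f = none := by
  induction gs with
  | nil => rfl
  | cons g tl ih =>
      rw [muround_cons, ih (fun g' hg' => h g' (by simp [hg']))]
      simp [h g (by simp)]

lemma muround_mem (gs : List (List String)) (g : List String) (f : String)
    (hdisj : DisjGs gs) (hg : g ∈ gs) (hf : f ∈ g) : muround gs f = some (prefOf g) := by
  induction gs with
  | nil => cases hg
  | cons g0 tl ih =>
      rw [muround_cons]
      rcases List.mem_cons.1 hg with h | h
      · subst h
        rw [muround_none tl f (fun g' hg' => (List.pairwise_cons.1 hdisj).1 g' hg' f hf)]
        simp [hf]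
      · rw [ih (List.pairwise_cons.1 hdisj).2 h]
        simp [Option.or]

lemma mubfs_none (n : Nat) (gs : List (List String)) (f : String)
    (h : ∀ g ∈ gs, f ∉ g) : mubfs n gs f = none := by
  induction n generalizing gs with
  | zero => rfl
  | succ n ih =>
      rw [mubfs_succ, muround_none gs f h, ih (gs.flatMap childrenOf) ?_]
      · rfl
      · intro c hc hf
        rcases List.mem_flatMap.1 hc with ⟨g', hg', hcg'⟩
        exact h g' hg' (mem_childrenOf_subset g' c hcg' f hf)

lemma disj_symm : Symmetric (fun (g1 g2 : List String) => ∀ f ∈ g1, f ∉ g2) := by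
  intro x y hxy f hf hf'
  exact hxy f hf' hf

lemma mubfs_eq_muspec :
    ∀ (n : Nat) (gs : List (List String)) (g : List String) (f : String),
      DisjGs gs → g ∈ gs → f ∈ g → mubfs (n+1) gs f = muspec n g f := by
  intro n
  induction n with
  | zero =>
      intro gs g f hdisj hg hf
      rw [mubfs_succ, mubfs_zero, muround_mem gs g f hdisj hg hf, muspec_zero]
      simp [mugroup, hf]
  | succ n ih =>
      intro gs g f hdisj hg hf
      rw [mubfs_succ]
      cases hh : headAt f (kOf g) with
      | none =>
          rw [mubfs_none (n+1) (gs.flatMap childrenOf) f ?_, muround_mem gs g f hdisj hg hf,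
            muspec_succ]
          · simp [hf, hh]
          · intro c hc hfc
            rcases List.mem_flatMap.1 hc with ⟨g', hg', hcg'⟩
            by_cases hgg : g' = g
            · subst hgg
              rcases List.mem_map.1 hcg' with ⟨p, _, hp⟩
              have := (mem_child_iff g' p f).1 (hp ▸ hfc)
              rw [hh] at this; cases this.2
            · have hfg' : f ∈ g' := mem_childrenOf_subset g' c hcg' f hfc
              exact (List.Pairwise.forall disj_symm hdisj hg hg'
                (fun he => hgg he.symm)) f hf hfg'
      | some p =>
          have hfc : f ∈ childOf g p := (mem_child_iff g p f).2 ⟨hf, hh⟩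
          have hcmem : childOf g p ∈ gs.flatMap childrenOf := by
            apply List.mem_flatMap.2
            exact ⟨g, hg, List.mem_map_of_mem (mem_childKeys g f p hf hh)⟩
          rw [ih (gs.flatMap childrenOf) (childOf g p) f (disj_flatMap gs hdisj) hcmem hfc]
          rcases muspec_isSome n (childOf g p) f hfc with ⟨v, hv⟩
          rw [muspec_succ]
          simp [hf, hh, hv, Option.or]

-- ── DFS: recurseB is a pointwise overwrite by muspec ──

lemma foldl_children_ovw (g : List String) (m : Nat) (REC : PDict → String → PDict)
    (hrec : ∀ (pd : PDict) (p : String), p ∈ childKeys g → KeysOK pd (childOf g p) →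
      REC pd p = ovw pd (muspec m (childOf g p))) :
    ∀ ps, (∀ p ∈ ps, p ∈ childKeys g) → ∀ pd, KeysOK pd g →
      ps.foldl REC pd = ovw pd (nug g m ps) := by
  intro ps
  induction ps using List.reverseRecOn with
  | nil =>
      intro _ pd _
      simp only [List.foldl_nil]
      rw [ovw_none]
      intro f
      unfold nug
      by_cases hf : f ∈ g
      · simp only [hf, if_true]
        cases headAt f (kOf g) <;> simp
      · simp [hf]
  | append_singleton ps q ih =>
      intro hps pd hk
      rw [List.foldl_append, List.foldl_cons, List.foldl_nil]
      rw [ih (fun p hp => hps p (by simp [hp])) pd hk]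
      rw [hrec (ovw pd (nug g m ps)) q (hps q (by simp)) (by
        intro f hf
        rw [contains_ovw]
        exact hk f (child_subset g q f hf))]
      rw [ovw_ovw]
      congr 1
      funext f
      by_cases hf : f ∈ g
      · cases hh : headAt f (kOf g) with
        | none =>
            have hnc : f ∉ childOf g q := by
              intro hc; have := (mem_child_iff g q f).1 hc; rw [hh] at this; cases this.2
            rw [muspec_none m _ f hnc]
            unfold nug
            simp [hf, hh]
        | some p =>
            by_cases hpq : p = q
            · subst hpq
              have hfc : f ∈ childOf g p := (mem_child_iff g p f).2 ⟨hf, hh⟩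
              rcases muspec_isSome m (childOf g p) f hfc with ⟨v, hv⟩
              unfold nug
              simp [hf, hh, hv, Option.or]
            · have hnc : f ∉ childOf g q := by
                intro hc
                have := (mem_child_iff g q f).1 hc
                rw [hh] at this
                exact hpq (Option.some_inj.1 this.2)
              rw [muspec_none m _ f hnc]
              unfold nug
              by_cases hps' : p ∈ ps <;> simp [hf, hh, hps', hpq, Option.or]
      · have hnc : f ∉ childOf g q := fun hc => hf (child_subset g q f hc)
        rw [muspec_none m _ f hnc]
        unfold nug
        simp [hf]

lemma nug_full (g : List String) (m : Nat) (f : String) :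
    ((nug g m (childKeys g)) f).or (mugroup g f) = muspec (m+1) g f := by
  by_cases hf : f ∈ g
  · cases hh : headAt f (kOf g) with
    | none => rw [muspec_succ]; simp [nug, mugroup, hf, hh, Option.or]
    | some p =>
        have hp : p ∈ childKeys g := mem_childKeys g f p hf hh
        rcases muspec_isSome m (childOf g p) f ((mem_child_iff g p f).2 ⟨hf, hh⟩) with ⟨v, hv⟩
        rw [muspec_succ]
        simp [nug, mugroup, hf, hh, hp, hv, Option.or]
  · rw [muspec_succ]; simp [nug, mugroup, hf]

lemma recurseB_unfold (level : Int) (pd : PDict) (files : List String) (depth : Int) :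
    recurseB level pd files depth =
      (if depth < level - 1 then
         (files.foldl (fun g f =>
             match headAt f (kOf files) with
             | none => g
             | some p => g.insert p (g.getD p [] ++ [f])) PySem.Dict.empty).items.foldl
           (fun pd gv => recurseB level pd gv.2 (depth + 1))
           (files.foldl (fun d f => d.insert f (prefOf files)) pd)
       else files.foldl (fun d f => d.insert f (prefOf files)) pd) := by
  rw [recurseB]
  simp only [zip_foldl]
  rfl

lemma recurseB_eq_ovw :
    ∀ (n : Nat) (level depth : Int) (pd : PDict) (files : List String),
      (level - 1 - depth).toNat = n → files.Nodup → KeysOK pd files →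
      recurseB level pd files depth = ovw pd (muspec n files) := by
  intro n
  induction n with
  | zero =>
      intro level depth pd files hn hnd hk
      have hcond : ¬ (depth < level - 1) := by omega
      rw [recurseB_unfold, if_neg hcond, writes_eq_ovw _ files pd hk, muspec_zero]
      rfl
  | succ m ih =>
      intro level depth pd files hn hnd hk
      have hcond : depth < level - 1 := by omega
      rw [recurseB_unfold, if_pos hcond,
        gdict_items (fun f => headAt f (kOf files)) files, List.foldl_map,
        writes_eq_ovw _ files pd hk]
      dsimp only []
      rw [show gkeys (fun f => headAt f (kOf files)) files = childKeys files from rfl]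
      rw [foldl_children_ovw files m
        (fun pd gv => recurseB level pd (gfilter (fun f => headAt f (kOf files)) files gv) (depth + 1))
        (by
          intro pd' p hp hkc
          exact ih level (depth + 1) pd' (childOf files p) (by omega)
            (child_nodup files hnd p) hkc)
        (childKeys files) (fun p hp => hp)
        (ovw pd (fun x => if x ∈ files then some (prefOf files) else none))
        (by intro f hf; rw [contains_ovw]; exact hk f hf)]
      rw [ovw_ovw]
      congr 1
      funext f
      exact nug_full files m f

-- ── BFS: the round fold and bfsP are pointwise overwrites ──

lemma roundStep_eq :
    ∀ (gs : List (List String)) (pd : PDict) (acc : List (List String)),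
      (∀ g ∈ gs, g.Nodup ∧ KeysOK pd g) →
      gs.foldl (fun acc curr =>
          let pr := processGroupA acc.1 curr
          (pr.1, acc.2 ++ pr.2)) (pd, acc)
        = (ovw pd (muround gs), acc ++ gs.flatMap childrenOf) := by
  intro gs
  induction gs with
  | nil =>
      intro pd acc _
      simp only [List.foldl_nil, List.flatMap_nil, List.append_nil]
      rw [ovw_none]
      intro f; rfl
  | cons g tl ih =>
      intro pd acc h
      simp only [List.foldl_cons]
      rw [processGroupA_eq pd g (h g (by simp)).1 (h g (by simp)).2]
      rw [ih (ovw pd (mugroup g)) (acc ++ childrenOf g) ?_]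
      · have e1 : ovw (ovw pd (mugroup g)) (muround tl) = ovw pd (muround (g :: tl)) := by
          rw [ovw_ovw]
          congr 1
          funext f
          rw [muround_cons]
          cases muround tl f <;> by_cases hf : f ∈ g <;> simp [mugroup, hf, Option.or]
        rw [e1, List.flatMap_cons, List.append_assoc]
      · intro g' hg'
        exact ⟨(h g' (by simp [hg'])).1,
          fun f hf => by rw [contains_ovw]; exact (h g' (by simp [hg'])).2 f hf⟩

lemma bfsP_fst :
    ∀ (n : Nat) (pd : PDict) (gs : List (List String)),
      (∀ g ∈ gs, g.Nodup ∧ KeysOK pd g) →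
      (bfsP n (pd, gs)).1 = ovw pd (mubfs n gs) := by
  intro n
  induction n with
  | zero =>
      intro pd gs _
      show pd = ovw pd (mubfs 0 gs)
      rw [ovw_none]; intro f; rfl
  | succ n ih =>
      intro pd gs h
      show (bfsP n _).1 = _
      rw [roundStep_eq gs pd [] h]
      rw [ih (ovw pd (muround gs)) (([] : List (List String)) ++ gs.flatMap childrenOf) ?_]
      · rw [ovw_ovw]
        rfl
      · intro c hc
        simp only [List.nil_append] at hc
        rcases List.mem_flatMap.1 hc with ⟨g', hg', hcg'⟩
        refine ⟨mem_childrenOf_nodup g' (h g' hg').1 c hcg', ?_⟩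
        intro f hf
        rw [contains_ovw]
        exact (h g' hg').2 f (mem_childrenOf_subset g' c hcg' f hf)

lemma foldl_rounds :
    ∀ (l : List Int) (st : PDict × List (List String)),
      l.foldl (fun st _ => st.2.foldl (fun acc curr =>
          let pr := processGroupA acc.1 curr
          (pr.1, acc.2 ++ pr.2)) (st.1, [])) st
        = bfsP l.length st := by
  intro l
  induction l with
  | nil => intro st; rfl
  | cons x t ih => intro st; simp only [List.foldl_cons, List.length_cons]; rw [ih]; rfl

-- ===== VERDICT (by name: the statement is the Claim_ definition above) =====
lemma mubfs_eq_muspec_single (m : Nat) (filelist : List String) :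
    mubfs (m + 1) [filelist] = muspec m filelist := by
  funext f
  by_cases hf : f ∈ filelist
  · exact mubfs_eq_muspec m [filelist] filelist f (List.pairwise_singleton _ _)
      (by simp) hf
  · rw [muspec_none m filelist f hf, mubfs_none (m + 1) [filelist] f (by simpa using hf)]

theorem get_pack_dict_level_spec : Claim_equal_get_pack_dict_level := by
  intro filelist level hdom hpre
  unfold Spec_get_pack_dict_level
  rw [get_pack_dict_level, get_pack_dict_level_alt]
  rw [foldl_rounds, PySem.List.length_pyRange_one]
  by_cases hpos : 0 < (if [] ∈ filelist.map dirParts then level + 1 else level)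
  · have hpre' : filelist.Nodup := by
      rcases hpre with h | h
      · exact h
      · omega
    cases hn : ((if [] ∈ filelist.map dirParts then level + 1 else level) - 0).toNat with
    | zero => omega
    | succ m =>
        have hkeysok : KeysOK
            (filelist.foldl (fun d f => d.insert f ([] : List String)) PySem.Dict.empty)
            filelist := fun f hf => init_contains filelist hpre' f hf
        rw [bfsP_fst (m + 1)
          (filelist.foldl (fun d f => d.insert f ([] : List String)) PySem.Dict.empty)
          [filelist] (by
            intro g hg
            rcases List.mem_singleton.1 hg with rfl
            exact ⟨hpre', hkeysok⟩)]
        rw [if_pos hpos]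
        rw [recurseB_eq_ovw m (if [] ∈ filelist.map dirParts then level + 1 else level) 0
          (filelist.foldl (fun d f => d.insert f ([] : List String)) PySem.Dict.empty)
          filelist (by omega) hpre' hkeysok]
        rw [mubfs_eq_muspec_single m filelist]
  · have h0 : ((if [] ∈ filelist.map dirParts then level + 1 else level) - 0).toNat = 0 := by
      omega
    rw [h0, if_neg hpos]
    rfl
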